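-- pv_equiv track=rewrite | github.com/Chopinsky/algo-problems | challenges/3999/3806-maximum-bitwise-and-after-increment-operations.py | maximumAND
-- ===== SOURCE A (Python) =====
-- from typing import List
--
-- def maximumAND(nums: List[int], k: int, m: int) -> int:
--   ans = 0
--   n = len(nums)
--
--   for bit in range(30, -1, -1):
--     target = ans | (1<<bit)
--     costs = []
--
--     for val in nums:
--       missing = target & ~val
--       if missing == 0:
--         costs.append(0)
--         continue
--
--       high_bit = missing.bit_length() - 1
--       nxt_bit = high_bit
--
--       while ((val>>nxt_bit) & 1) == 1:
--         nxt_bit += 1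
--
--       mask = (1<<nxt_bit) - 1
--       cost = ((val&~mask) | (1<<nxt_bit) | (target&mask)) - val
--       costs.append(cost)
--
--     costs.sort()
--     total_cost = sum(costs[:m])
--     if total_cost <= k:
--       ans = target
--
--   return ans
-- ===== SOURCE B (Python) =====
-- from typing import List
--
--
-- def _sum_smallest(costs: List[int], m: int) -> int:
--     # Sum of the m smallest elements by iterative three-way partitioning
--     # (quickselect-style, middle pivot) -- no sorting.
--     acc = 0
--     while True:
--         if m <= 0:
--             return acc
--         if m >= len(costs):
--             return acc + sum(costs)
--         pivot = costs[len(costs) // 2]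
--         lt = [c for c in costs if c < pivot]
--         eq = [c for c in costs if c == pivot]
--         gt = [c for c in costs if c > pivot]
--         if m <= len(lt):
--             costs = lt
--         elif m <= len(lt) + len(eq):
--             return acc + sum(lt) + pivot * (m - len(lt))
--         else:
--             acc += sum(lt) + sum(eq)
--             m -= len(lt) + len(eq)
--             costs = gt
--
--
-- def _cost(target: int, val: int) -> int:
--     # Least increment that gives val all bits of target.
--     missing = target & ~val
--     if missing == 0:
--         return 0
--     h = missing.bit_length() - 1  # top missing bit; val's bit h is 0
--     mask = (1 << h) - 1
--     return ((val & ~mask) | (1 << h) | (target & mask)) - val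
--
--
-- def maximumAND(nums: List[int], k: int, m: int) -> int:
--     ans = 0
--     for bit in range(30, -1, -1):
--         target = ans | (1 << bit)
--         costs = [_cost(target, v) for v in nums]
--         if _sum_smallest(costs, m) <= k:
--             ans = target
--     return ans
-- ===== Notes on version B (the rewrite author's own statement) =====
-- stated objective: alternative
-- what changed: B selects the m cheapest increment costs by an iterative quickselect-style three-way partition instead of A's full sort + slice, computes per-element costs with a mapped helper, and drops A's dead inner while loop; Pre_ excludes negative m (a nonsensical count, where A's costs[:m] slice accidentally sums the n-|m| smallest).
-- outside the precondition, e.g. on maximumAND([1, 2, 3], 0, -1): A returns 2, B returns 2147483647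
import Mathlib
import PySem

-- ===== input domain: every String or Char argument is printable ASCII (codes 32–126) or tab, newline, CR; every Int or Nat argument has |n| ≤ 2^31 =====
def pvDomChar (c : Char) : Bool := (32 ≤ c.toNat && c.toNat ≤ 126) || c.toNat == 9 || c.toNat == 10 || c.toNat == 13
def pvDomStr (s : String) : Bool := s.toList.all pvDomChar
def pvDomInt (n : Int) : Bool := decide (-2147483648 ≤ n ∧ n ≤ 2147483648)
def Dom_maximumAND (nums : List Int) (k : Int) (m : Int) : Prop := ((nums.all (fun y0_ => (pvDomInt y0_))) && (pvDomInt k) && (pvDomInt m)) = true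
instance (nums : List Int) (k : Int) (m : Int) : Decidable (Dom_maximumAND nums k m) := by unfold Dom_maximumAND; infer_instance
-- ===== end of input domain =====

-- B replaces A's sort-and-slice selection of the m cheapest increments by a
-- quickselect-style three-way-partition selection (and drops A's dead inner
-- while loop); alternative algorithm, same values on every m ≥ 0.


-- ===== PORT A =====
-- Python's 'while ((val>>nxt_bit)&1)==1: nxt_bit += 1', fuelled: the loop is
-- reached only with the guard false on entry (the top bit of 'missing' is a
-- zero bit of val, proved below), so the fuel is never consumed there.
def pvWhileA (val : Int) : Nat → Nat → Nat
  | nxt, 0 => nxt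
  | nxt, Nat.succ fuel =>
      if PySem.Int.band (val >>> nxt) 1 == 1 then pvWhileA val (nxt + 1) fuel else nxt

def maximumAND (nums : List Int) (k : Int) (m : Int) : Int :=
  (PySem.List.pyRange 30 (-1) (-1)).foldl (fun ans bit =>
    -- bit ranges over 30..0, so 'bit.toNat' is exact for Python's '1 << bit'
    let target := PySem.Int.bor ans (1 <<< bit.toNat)
    let costs := nums.foldl (fun costs val =>
      let missing := PySem.Int.band target (Int.not val)
      if missing == 0 then costs ++ [(0 : Int)]
      else
        -- missing > 0 here, so Nat subtraction is exact for 'bit_length() - 1'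
        let high_bit : Nat := PySem.Int.bitLength missing - 1
        let nxt_bit := pvWhileA val high_bit 64
        let mask : Int := (1 <<< nxt_bit) - 1
        let cost := PySem.Int.bor (PySem.Int.bor (PySem.Int.band val (Int.not mask))
            (1 <<< nxt_bit)) (PySem.Int.band target mask) - val
        costs ++ [cost]) []
    let sortedCosts := PySem.List.sorted costs (fun x => x) false
    let total := (PySem.List.slice sortedCosts none (some m)).sum
    if total ≤ k then target else ans) 0

-- ===== PORT B =====
def pvCost (target val : Int) : Int :=
  let missing := PySem.Int.band target (Int.not val)
  if missing == 0 then 0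
  else
    -- missing > 0 here, so Nat subtraction is exact for 'bit_length() - 1'
    let h : Nat := PySem.Int.bitLength missing - 1
    let mask : Int := (1 <<< h) - 1
    PySem.Int.bor (PySem.Int.bor (PySem.Int.band val (Int.not mask)) (1 <<< h))
      (PySem.Int.band target mask) - val

-- B's iterative quickselect loop, as tail recursion on the shrinking list;
-- 'costs.getD (costs.length / 2) 0' is Python's 'costs[len(costs)//2]', exact
-- because the index is in range on the branch where it is read.
def pvSumSmallest (acc : Int) (costs : List Int) (m : Int) : Int :=
  if m ≤ 0 then acc
  else if (costs.length : Int) ≤ m then acc + costs.sum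
  else
    let pivot := costs.getD (costs.length / 2) 0
    let lt := costs.filter (fun c => decide (c < pivot))
    let eq := costs.filter (fun c => c == pivot)
    let gt := costs.filter (fun c => decide (pivot < c))
    if m ≤ (lt.length : Int) then pvSumSmallest acc lt m
    else if m ≤ (lt.length : Int) + eq.length then acc + lt.sum + pivot * (m - lt.length)
    else pvSumSmallest (acc + (lt.sum + eq.sum)) gt (m - (lt.length + eq.length))
termination_by costs.length
decreasing_by
  all_goals
    have hidx : costs.length / 2 < costs.length := by
      have : costs.length ≠ 0 := by
        intro h0
        simp [h0] at *
        omega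
      exact Nat.div_lt_self (by omega) one_lt_two
    have hmem : costs.getD (costs.length / 2) 0 ∈ costs := by
      rw [List.getD_eq_getElem costs 0 hidx]; exact List.getElem_mem hidx
    simp only [List.length_unattach]
    conv_rhs => rw [← List.length_attach (l := costs)]
    exact List.length_filter_lt_length_iff_exists.mpr ⟨⟨_, hmem⟩, List.mem_attach _ _, by simp⟩

def maximumAND_alt (nums : List Int) (k : Int) (m : Int) : Int :=
  (PySem.List.pyRange 30 (-1) (-1)).foldl (fun ans bit =>
    -- bit ranges over 30..0, so 'bit.toNat' is exact for Python's '1 << bit'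
    let target := PySem.Int.bor ans (1 <<< bit.toNat)
    let costs := nums.map (pvCost target)
    if pvSumSmallest 0 costs m ≤ k then target else ans) 0

-- ===== PRECONDITION & SPEC =====
-- Pre_ excludes negative m, a nonsensical count of elements to pick: A's
-- 'costs[:m]' slice then accidentally sums the n-|m| smallest costs, while
-- B's selection naturally picks nothing; A does return a value there.
def Pre_maximumAND (nums : List Int) (k : Int) (m : Int) : Prop := 0 ≤ m
instance (nums : List Int) (k : Int) (m : Int) : Decidable (Pre_maximumAND nums k m) := by unfold Pre_maximumAND; infer_instance
def pvWitness_maximumAND : List Int × Int × Int := ([1, 2, 3], 5, 2)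

def Spec_maximumAND (nums : List Int) (k : Int) (m : Int) (out : Int) : Prop := out = maximumAND_alt nums k m
instance (nums : List Int) (k : Int) (m : Int) (out : Int) : Decidable (Spec_maximumAND nums k m out) := by unfold Spec_maximumAND; infer_instance

-- ===== CLAIM (what is proved, stated in full; the proofs are below) =====
def Claim_equal_maximumAND : Prop := ∀ (nums : List Int) (k : Int) (m : Int), Dom_maximumAND nums k m → Pre_maximumAND nums k m → Spec_maximumAND nums k m (maximumAND nums k m)

-- ===== LEMMAS AND PROOFS =====
theorem pv_sub_land (T V : ℕ) : T - (T &&& V) = Nat.ldiff T V := by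
  induction T using Nat.binaryRec generalizing V with
  | zero => simp [Nat.ldiff]
  | bit b n ih =>
    rw [← Nat.bit_bodd_div2 V, Nat.land_bit, Nat.ldiff_bit, ← ih (Nat.div2 V)]
    have h1 : n &&& Nat.div2 V ≤ n := Nat.and_le_left
    cases b <;> cases Nat.bodd V <;> simp [Nat.bit] <;> omega

theorem pv_testBit_of_bounds (M h : ℕ) (h1 : 2^h ≤ M) (h2 : M < 2^(h+1)) : M.testBit h = true := by
  rw [Nat.testBit, Nat.shiftRight_eq_div_pow]
  have : M / 2^h = 1 := Nat.div_eq_of_lt_le (by omega) (by rw [pow_succ] at h2; omega)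
  simp [this]

theorem pvGuardFalse (target val : Int) (ht : 0 ≤ target)
    (hm : PySem.Int.band target (Int.not val) ≠ 0) :
    PySem.Int.band (val >>> (PySem.Int.bitLength (PySem.Int.band target (Int.not val)) - 1)) 1 = 0 := by
  have hnn : 0 ≤ PySem.Int.band target (Int.not val) :=
    PySem.Int.band_nonneg_of_nonneg_left _ ht
  set h := PySem.Int.bitLength (PySem.Int.band target (Int.not val)) - 1 with hh
  have hub := PySem.Int.lt_two_pow_bitLength (PySem.Int.band target (Int.not val))
  have hlb := PySem.Int.two_pow_bitLength_le (PySem.Int.band target (Int.not val)) hm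
  have hb1 : 1 ≤ PySem.Int.bitLength (PySem.Int.band target (Int.not val)) := by
    by_contra hc
    have h0 : PySem.Int.bitLength (PySem.Int.band target (Int.not val)) = 0 := by omega
    rw [h0] at hub
    simp at hub
    omega
  have hsucc : h + 1 = PySem.Int.bitLength (PySem.Int.band target (Int.not val)) := by omega
  have htb : (PySem.Int.band target (Int.not val)).natAbs.testBit h = true := by
    apply pv_testBit_of_bounds
    · exact hlb
    · rw [hsucc]; exact hub
  cases val with
  | ofNat V =>
    have hnot : Int.not (Int.ofNat V) = Int.negSucc V := rfl
    rw [hnot] at htb hh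
    have hband : PySem.Int.band target (Int.negSucc V) =
        ((target.toNat - (target.toNat &&& V) : ℕ) : Int) := by
      simp [PySem.Int.band, ht]
    rw [hband] at htb
    rw [pv_sub_land] at htb
    simp only [Int.natAbs_natCast, Nat.testBit_ldiff, Bool.and_eq_true, Bool.not_eq_true'] at htb
    have hV : (V >>> h) &&& 1 = 0 := by simpa [Nat.testBit] using htb.2
    have hsh : (Int.ofNat V) >>> h = Int.ofNat (V >>> h) := by
      simp [HShiftRight.hShiftRight, Int.shiftRight]
    rw [hsh]
    generalize hW : V >>> h = W at hV
    have hb : PySem.Int.band (Int.ofNat W) 1 = ((W &&& 1 : ℕ) : Int) := by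
      simp [PySem.Int.band]
    rw [hb, hV]; rfl
  | negSucc V =>
    have hnot : Int.not (Int.negSucc V) = Int.ofNat V := rfl
    rw [hnot] at htb hh
    have hband : PySem.Int.band target (Int.ofNat V) =
        ((target.toNat &&& V : ℕ) : Int) := by
      simp [PySem.Int.band, ht]
    rw [hband] at htb
    simp only [Int.natAbs_natCast, Nat.testBit_land, Bool.and_eq_true] at htb
    have hV : 1 &&& (V >>> h) = 1 := by
      rw [Nat.land_comm]
      simpa [Nat.testBit, Nat.and_one_is_mod] using htb.2
    have hsh : (Int.negSucc V) >>> h = Int.negSucc (V >>> h) := by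
      simp [HShiftRight.hShiftRight, Int.shiftRight]
    rw [hsh]
    generalize hW : V >>> h = W at hV
    have hb : PySem.Int.band (Int.negSucc W) 1 = ((1 - (1 &&& W) : ℕ) : Int) := by
      simp [PySem.Int.band]
    rw [hb, hV]
    rfl

-- A's per-element cost block equals pvCost
theorem pvCostA_eq (target val : Int) (ht : 0 ≤ target) :
    (let missing := PySem.Int.band target (Int.not val)
     if missing == 0 then (0 : Int)
     else
       let high_bit : Nat := PySem.Int.bitLength missing - 1
       let nxt_bit := pvWhileA val high_bit 64
       let mask : Int := (1 <<< nxt_bit) - 1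
       PySem.Int.bor (PySem.Int.bor (PySem.Int.band val (Int.not mask))
           (1 <<< nxt_bit)) (PySem.Int.band target mask) - val) = pvCost target val := by
  simp only [pvCost]
  by_cases h0 : PySem.Int.band target (Int.not val) = 0
  · simp [h0]
  · have hg := pvGuardFalse target val ht h0
    have hw : pvWhileA val (PySem.Int.bitLength (PySem.Int.band target (Int.not val)) - 1) 64
        = PySem.Int.bitLength (PySem.Int.band target (Int.not val)) - 1 := by
      show (if PySem.Int.band (val >>> (PySem.Int.bitLength (PySem.Int.band target (Int.not val)) - 1)) 1 == 1 then _ else _) = _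
      rw [hg]
      simp
    simp only [h0, beq_iff_eq, hw]

theorem pv_sorted_partition (l : List Int) (p : Int) :
    PySem.List.sorted l (fun x => x) false =
      PySem.List.sorted (l.filter (fun c => decide (c < p))) (fun x => x) false
        ++ l.filter (fun c => c == p)
        ++ PySem.List.sorted (l.filter (fun c => decide (p < c))) (fun x => x) false := by
  set lt := l.filter (fun c => decide (c < p)) with hlt
  set eq := l.filter (fun c => c == p) with heq
  set gt := l.filter (fun c => decide (p < c)) with hgt
  have hmemlt : ∀ x ∈ lt, x < p := by intro x hx; rw [hlt] at hx; simpa using (List.mem_filter.mp hx).2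
  have hmemeq : ∀ x ∈ eq, x = p := by intro x hx; rw [heq] at hx; simpa using (List.mem_filter.mp hx).2
  have hmemgt : ∀ x ∈ gt, p < x := by intro x hx; rw [hgt] at hx; simpa using (List.mem_filter.mp hx).2
  have hperm : (PySem.List.sorted lt (fun x => x) false ++ eq
      ++ PySem.List.sorted gt (fun x => x) false).Perm l := by
    have h1 : (lt ++ l.filter (fun c => !decide (c < p))).Perm l := List.filter_append_perm _ l
    set l2 := l.filter (fun c => !decide (c < p)) with hl2
    have h2 : (l2.filter (fun c => c == p) ++ l2.filter (fun c => !(c == p))).Perm l2 :=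
      List.filter_append_perm _ l2
    have e1 : l2.filter (fun c => c == p) = eq := by
      rw [hl2, List.filter_filter, heq]
      apply List.filter_congr
      intro x _
      by_cases hx : x = p <;> simp [hx]
    have e2 : l2.filter (fun c => !(c == p)) = gt := by
      rw [hl2, List.filter_filter, hgt]
      apply List.filter_congr
      intro x _
      rcases lt_trichotomy x p with h | h | h
      · simp [h]; omega
      · simp [h]
      · simp [h]; constructor <;> omega
    rw [e1, e2] at h2
    have s1 : (PySem.List.sorted lt (fun x => x) false ++ (eq ++ PySem.List.sorted gt (fun x => x) false)).Perm
        (lt ++ (eq ++ gt)) :=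
      List.Perm.append (PySem.List.sorted_perm _ _ _)
        (List.Perm.append (List.Perm.refl _) (PySem.List.sorted_perm _ _ _))
    have s2 : (lt ++ (eq ++ gt)).Perm (lt ++ l2) := List.Perm.append (List.Perm.refl _) h2
    have := (s1.trans s2).trans h1
    simpa [List.append_assoc] using this
  refine PySem.List.sorted_id_eq_of_perm_of_pairwise _ _ hperm ?_
  rw [List.append_assoc]
  apply List.pairwise_append.mpr
  refine ⟨?_, ?_, ?_⟩
  · exact PySem.List.sorted_pairwise lt (fun x => x)
  · apply List.pairwise_append.mpr
    refine ⟨?_, ?_, ?_⟩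
    · have hrep : eq = List.replicate eq.length p := List.eq_replicate_of_mem hmemeq
      rw [hrep]
      exact List.pairwise_replicate.mpr (Or.inr le_rfl)
    · exact PySem.List.sorted_pairwise gt (fun x => x)
    · intro a ha b hb
      have hb' := hmemgt b (((PySem.List.sorted_perm _ _ _)).mem_iff.mp hb)
      have ha' := hmemeq a ha
      omega
  · intro a ha b hb
    have ha' := hmemlt a ((PySem.List.sorted_perm _ _ _).mem_iff.mp ha)
    rcases List.mem_append.mp hb with hb | hb
    · have := hmemeq b hb; omega
    · have := hmemgt b ((PySem.List.sorted_perm _ _ _).mem_iff.mp hb); omega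

theorem pvSumSmallest_eq (acc : Int) (costs : List Int) (m : Int) :
    pvSumSmallest acc costs m
      = acc + ((PySem.List.sorted costs (fun x => x) false).take m.toNat).sum := by
  induction acc, costs, m using pvSumSmallest.induct with
  | case1 acc costs m h =>
    unfold pvSumSmallest
    rw [if_pos h]
    have : m.toNat = 0 := by omega
    simp [this]
  | case2 acc costs m h1 h2 =>
    unfold pvSumSmallest
    rw [if_neg h1, if_pos h2]
    have hlen : (PySem.List.sorted costs (fun x => x) false).length = costs.length :=
      (PySem.List.sorted_perm _ _ _).length_eq
    rw [List.take_of_length_le (by omega)]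
    have := (PySem.List.sorted_perm costs (fun x => x) false).sum_eq
    rw [this]
  | case3 acc costs m h1 h2 pivot ltl hble ih =>
    rw [pvSumSmallest]
    rw [if_neg h1, if_neg h2]
    simp only [ltl, pivot] at hble ih
    rw [List.unattach_filter (g := fun c => decide (c < costs.getD (costs.length / 2) 0)) (hf := fun x h => rfl), List.unattach_attach] at hble ih
    rw [if_pos hble]
    set p := costs.getD (costs.length / 2) 0 with hp
    set lt := costs.filter (fun c => decide (c < p)) with hlt
    rw [ih, pv_sorted_partition costs p]
    rw [List.append_assoc, List.take_append_of_le_length]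
    rw [(PySem.List.sorted_perm lt (fun x => x) false).length_eq]
    omega
  | case4 acc costs m h1 h2 pivot ltl eql hgt hble =>
    rw [pvSumSmallest]
    rw [if_neg h1, if_neg h2]
    simp only [ltl, eql, pivot] at hgt hble
    rw [List.unattach_filter (g := fun c => decide (c < costs.getD (costs.length / 2) 0)) (hf := fun x h => rfl), List.unattach_attach] at hgt
    rw [List.unattach_filter (g := fun c => decide (c < costs.getD (costs.length / 2) 0)) (hf := fun x h => rfl), List.unattach_attach,
        List.unattach_filter (g := fun c => c == costs.getD (costs.length / 2) 0) (hf := fun x h => rfl), List.unattach_attach] at hble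
    rw [if_neg hgt, if_pos hble]
    set p := costs.getD (costs.length / 2) 0 with hp
    set lt := costs.filter (fun c => decide (c < p)) with hlt
    set eq := costs.filter (fun c => c == p) with heq
    rw [pv_sorted_partition costs p]
    rw [List.append_assoc, List.take_append, List.take_append]
    have hllen : (PySem.List.sorted lt (fun x => x) false).length = lt.length :=
      (PySem.List.sorted_perm _ _ _).length_eq
    have hltake : List.take m.toNat (PySem.List.sorted lt (fun x => x) false)
        = PySem.List.sorted lt (fun x => x) false :=
      List.take_of_length_le (by omega)
    have hrep : eq = List.replicate eq.length p := List.eq_replicate_of_mem (by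
      intro b hb
      rw [heq] at hb
      simpa using (List.mem_filter.mp hb).2)
    have heqtake : List.take (m.toNat - (PySem.List.sorted lt (fun x => x) false).length) eq
        = List.replicate (m.toNat - lt.length) p := by
      rw [hllen]
      conv_lhs => rw [hrep]
      rw [List.take_replicate]
      congr 1
      omega
    have hgttake : List.take (m.toNat - (PySem.List.sorted lt (fun x => x) false).length - eq.length)
        (PySem.List.sorted (costs.filter (fun c => decide (p < c))) (fun x => x) false) = [] := by
      apply List.take_eq_nil_iff.mpr
      left
      rw [hllen]
      omega
    rw [hltake, heqtake, hgttake]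
    rw [List.sum_append, List.sum_append, List.sum_nil, List.sum_replicate]
    rw [(PySem.List.sorted_perm lt (fun x => x) false).sum_eq]
    have hc : ((m.toNat - lt.length : ℕ) : Int) = m - lt.length := by omega
    rw [nsmul_eq_mul, hc]
    ring
  | case5 acc costs m h1 h2 pivot ltl eql gtl hgt1 hgt2 ih =>
    rw [pvSumSmallest]
    rw [if_neg h1, if_neg h2]
    simp only [ltl, eql, gtl, pivot] at hgt1 hgt2 ih
    rw [List.unattach_filter (g := fun c => decide (c < costs.getD (costs.length / 2) 0)) (hf := fun x h => rfl), List.unattach_attach] at hgt1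
    rw [List.unattach_filter (g := fun c => decide (c < costs.getD (costs.length / 2) 0)) (hf := fun x h => rfl), List.unattach_attach,
        List.unattach_filter (g := fun c => c == costs.getD (costs.length / 2) 0) (hf := fun x h => rfl), List.unattach_attach] at hgt2
    rw [List.unattach_filter (g := fun c => decide (c < costs.getD (costs.length / 2) 0)) (hf := fun x h => rfl), List.unattach_attach,
        List.unattach_filter (g := fun c => c == costs.getD (costs.length / 2) 0) (hf := fun x h => rfl), List.unattach_attach,
        List.unattach_filter (g := fun c => decide (costs.getD (costs.length / 2) 0 < c)) (hf := fun x h => rfl), List.unattach_attach] at ih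
    rw [if_neg hgt1, if_neg hgt2]
    set p := costs.getD (costs.length / 2) 0 with hp
    set lt := costs.filter (fun c => decide (c < p)) with hlt
    set eq := costs.filter (fun c => c == p) with heq
    set gt := costs.filter (fun c => decide (p < c)) with hgt
    rw [pv_sorted_partition costs p, ih]
    rw [List.append_assoc, List.take_append, List.take_append]
    have hllen : (PySem.List.sorted lt (fun x => x) false).length = lt.length :=
      (PySem.List.sorted_perm _ _ _).length_eq
    have hltake : List.take m.toNat (PySem.List.sorted lt (fun x => x) false)
        = PySem.List.sorted lt (fun x => x) false :=
      List.take_of_length_le (by omega)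
    have heqtake : List.take (m.toNat - (PySem.List.sorted lt (fun x => x) false).length) eq = eq :=
      List.take_of_length_le (by rw [hllen]; omega)
    have hc : (m - (lt.length + eq.length)).toNat
        = m.toNat - (PySem.List.sorted lt (fun x => x) false).length - eq.length := by
      rw [hllen]; omega
    rw [hltake, heqtake, hc]
    rw [List.sum_append, List.sum_append]
    rw [(PySem.List.sorted_perm lt (fun x => x) false).sum_eq]
    ring

theorem pv_select_eq (costs : List Int) (m : Int) (hm : 0 ≤ m) :
    (PySem.List.slice (PySem.List.sorted costs (fun x => x) false) none (some m)).sum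
      = pvSumSmallest 0 costs m := by
  rw [PySem.List.slice_to _ hm]
  rw [pvSumSmallest_eq]
  simp

-- one step of the per-bit loop: A's body equals B's body, and stays nonnegative
theorem pv_step_eq (nums : List Int) (k m ans bit : Int) (h : 0 ≤ ans) (hm : 0 ≤ m) :
    (let target := PySem.Int.bor ans (1 <<< bit.toNat)
     let costs := nums.foldl (fun costs val =>
       let missing := PySem.Int.band target (Int.not val)
       if missing == 0 then costs ++ [(0 : Int)]
       else
         let high_bit : Nat := PySem.Int.bitLength missing - 1
         let nxt_bit := pvWhileA val high_bit 64
         let mask : Int := (1 <<< nxt_bit) - 1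
         let cost := PySem.Int.bor (PySem.Int.bor (PySem.Int.band val (Int.not mask))
             (1 <<< nxt_bit)) (PySem.Int.band target mask) - val
         costs ++ [cost]) []
     let sortedCosts := PySem.List.sorted costs (fun x => x) false
     let total := (PySem.List.slice sortedCosts none (some m)).sum
     if total ≤ k then target else ans)
    = (let target := PySem.Int.bor ans (1 <<< bit.toNat)
       let costs := nums.map (pvCost target)
       if pvSumSmallest 0 costs m ≤ k then target else ans) := by
  have ht : (0:Int) ≤ PySem.Int.bor ans (1 <<< bit.toNat) := by
    rw [PySem.Int.bor_of_nonneg h (Int.natCast_nonneg _)]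
    positivity
  set target := PySem.Int.bor ans (1 <<< bit.toNat) with htarget
  have hcosts : nums.foldl (fun costs val =>
       let missing := PySem.Int.band target (Int.not val)
       if missing == 0 then costs ++ [(0 : Int)]
       else
         let high_bit : Nat := PySem.Int.bitLength missing - 1
         let nxt_bit := pvWhileA val high_bit 64
         let mask : Int := (1 <<< nxt_bit) - 1
         let cost := PySem.Int.bor (PySem.Int.bor (PySem.Int.band val (Int.not mask))
             (1 <<< nxt_bit)) (PySem.Int.band target mask) - val
         costs ++ [cost]) [] = nums.map (pvCost target) := by
    rw [PySem.List.foldl_congr_mem nums _ (fun costs val => costs ++ [pvCost target val]) []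
      (by
        intro acc x _
        show _ = acc ++ [pvCost target x]
        rw [← pvCostA_eq target x ht]
        by_cases h0 : PySem.Int.band target (Int.not x) = 0 <;> simp [h0])]
    rw [PySem.List.foldl_append_singleton_eq_map]
    simp
  simp only [hcosts]
  rw [pv_select_eq _ _ hm]

theorem pv_fold_eq (nums : List Int) (k m : Int) (bits : List Int) (ans : Int) (h : 0 ≤ ans)
    (hm : 0 ≤ m) :
    bits.foldl (fun ans bit =>
      let target := PySem.Int.bor ans (1 <<< bit.toNat)
      let costs := nums.foldl (fun costs val =>
        let missing := PySem.Int.band target (Int.not val)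
        if missing == 0 then costs ++ [(0 : Int)]
        else
          let high_bit : Nat := PySem.Int.bitLength missing - 1
          let nxt_bit := pvWhileA val high_bit 64
          let mask : Int := (1 <<< nxt_bit) - 1
          let cost := PySem.Int.bor (PySem.Int.bor (PySem.Int.band val (Int.not mask))
              (1 <<< nxt_bit)) (PySem.Int.band target mask) - val
          costs ++ [cost]) []
      let sortedCosts := PySem.List.sorted costs (fun x => x) false
      let total := (PySem.List.slice sortedCosts none (some m)).sum
      if total ≤ k then target else ans) ans
    = bits.foldl (fun ans bit =>
        let target := PySem.Int.bor ans (1 <<< bit.toNat)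
        let costs := nums.map (pvCost target)
        if pvSumSmallest 0 costs m ≤ k then target else ans) ans := by
  induction bits generalizing ans with
  | nil => rfl
  | cons b bs ih =>
    simp only [List.foldl_cons]
    rw [← pv_step_eq nums k m ans b h hm]
    apply ih
    have ht : (0:Int) ≤ PySem.Int.bor ans (1 <<< b.toNat) := by
      rw [PySem.Int.bor_of_nonneg h (Int.natCast_nonneg _)]
      positivity
    show (0:Int) ≤ if _ ≤ k then _ else ans
    split <;> [exact ht; exact h]

theorem maximumAND_eq_alt (nums : List Int) (k m : Int) (hm : 0 ≤ m) :
    maximumAND nums k m = maximumAND_alt nums k m := by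
  unfold maximumAND maximumAND_alt
  exact pv_fold_eq nums k m _ 0 le_rfl hm

-- ===== VERDICT (by name: the statement is the Claim_ definition above) =====
theorem maximumAND_spec : Claim_equal_maximumAND := by
  intro nums k m _ hm
  unfold Spec_maximumAND
  exact maximumAND_eq_alt nums k m hm
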